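-- pv_equiv track=rewrite | github.com/gpb360/AI-Marketing-Web-Builder | backend/app/services/scenario_modeling_service.py | _assess_implementation_complexity
-- ===== SOURCE A (Python) =====
-- from typing import Dict, List, Optional, Any, Tuple, Union
--
-- def _assess_implementation_complexity(modifications: Dict[str, Any]) -> str:
--     """Assess implementation complexity of modifications."""
--     complexity_score = 0
--
--     for param, value in modifications.items():
--         # Simple heuristic for complexity assessment
--         if param in ['layout', 'components', 'structure']:
--             complexity_score += 3
--         elif param in ['styles', 'colors', 'fonts']:
--             complexity_score += 2
--         else:
--             complexity_score += 1
--
--     if complexity_score <= 3: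
--         return 'low'
--     elif complexity_score <= 7:
--         return 'medium'
--     else:
--         return 'high'
-- ===== SOURCE B (Python) =====
-- _HIGH = {'layout', 'components', 'structure'}
-- _MEDIUM = {'styles', 'colors', 'fonts'}
--
-- def _assess_implementation_complexity(modifications):
--     """Assess implementation complexity of modifications (closed-form score)."""
--     keys = modifications.keys()
--     high = len(_HIGH & keys)
--     medium = len(_MEDIUM & keys)
--     score = 3 * high + 2 * medium + (len(modifications) - high - medium)
--     if score <= 3:
--         return 'low'
--     if score <= 7:
--         return 'medium'
--     return 'high'
-- ===== Notes on version B (the rewrite author's own statement) =====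
-- stated objective: simpler
-- what changed: Replaces the per-key if/elif accumulation loop with a closed-form score computed from two set-intersection counts (3*high + 2*medium + remainder), then the same threshold chain.
import Mathlib
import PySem

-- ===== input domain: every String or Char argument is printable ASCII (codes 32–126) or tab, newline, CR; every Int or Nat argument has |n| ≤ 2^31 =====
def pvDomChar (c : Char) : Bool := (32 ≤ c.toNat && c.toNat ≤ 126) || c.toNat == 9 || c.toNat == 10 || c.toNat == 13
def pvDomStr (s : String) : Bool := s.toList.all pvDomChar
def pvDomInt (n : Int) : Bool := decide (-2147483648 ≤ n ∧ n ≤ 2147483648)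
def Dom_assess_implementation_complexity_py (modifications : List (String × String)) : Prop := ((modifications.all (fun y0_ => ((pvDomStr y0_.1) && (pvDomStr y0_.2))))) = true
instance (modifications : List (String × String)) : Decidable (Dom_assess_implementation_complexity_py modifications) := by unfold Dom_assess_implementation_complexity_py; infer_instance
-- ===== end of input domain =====

-- B computes the complexity score in closed form from two category counts instead of A's per-key if/elif loop; same thresholds, same result (objective: simpler).


-- ===== PORT A =====
-- literal transliteration: accumulate 3/2/1 per key in order, then the threshold chain
def assess_implementation_complexity_py (modifications : List (String × String)) : String :=
  let complexity_score : Int :=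
    modifications.foldl
      (fun complexity_score pv =>
        if pv.1 = "layout" ∨ pv.1 = "components" ∨ pv.1 = "structure" then
          complexity_score + 3
        else if pv.1 = "styles" ∨ pv.1 = "colors" ∨ pv.1 = "fonts" then
          complexity_score + 2
        else
          complexity_score + 1) 0
  if complexity_score ≤ 3 then "low"
  else if complexity_score ≤ 7 then "medium"
  else "high"

-- ===== PORT B =====
def bHigh : List String := ["layout", "components", "structure"]
def bMedium : List String := ["styles", "colors", "fonts"]

-- closed-form score: 3*|keys ∩ HIGH| + 2*|keys ∩ MEDIUM| + (len - high - medium)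
def assess_implementation_complexity_py_alt (modifications : List (String × String)) : String :=
  let keys := modifications.map (·.1)
  let high : Int := (keys.countP (fun k => bHigh.contains k) : Nat)
  let medium : Int := (keys.countP (fun k => bMedium.contains k) : Nat)
  let score : Int := 3 * high + 2 * medium + ((modifications.length : Int) - high - medium)
  if score ≤ 3 then "low"
  else if score ≤ 7 then "medium"
  else "high"

-- ===== PRECONDITION & SPEC =====
def Spec_assess_implementation_complexity_py (modifications : List (String × String)) (out : String) : Prop := out = assess_implementation_complexity_py_alt modifications
instance (modifications : List (String × String)) (out : String) : Decidable (Spec_assess_implementation_complexity_py modifications out) := by unfold Spec_assess_implementation_complexity_py; infer_instance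

-- ===== CLAIM (what is proved, stated in full; the proofs are below) =====
def Claim_equal_assess_implementation_complexity_py : Prop := ∀ (modifications : List (String × String)), Dom_assess_implementation_complexity_py modifications → Spec_assess_implementation_complexity_py modifications (assess_implementation_complexity_py modifications)

-- ===== LEMMAS AND PROOFS =====

-- A's loop equals B's closed form, for any starting accumulator
lemma score_eq (l : List (String × String)) (acc : Int) :
    l.foldl
      (fun complexity_score pv =>
        if pv.1 = "layout" ∨ pv.1 = "components" ∨ pv.1 = "structure" then
          complexity_score + 3
        else if pv.1 = "styles" ∨ pv.1 = "colors" ∨ pv.1 = "fonts" then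
          complexity_score + 2
        else
          complexity_score + 1) acc
    = acc + 3 * ((l.map (·.1)).countP (fun k => bHigh.contains k) : Nat)
        + 2 * ((l.map (·.1)).countP (fun k => bMedium.contains k) : Nat)
        + ((l.length : Int)
            - ((l.map (·.1)).countP (fun k => bHigh.contains k) : Nat)
            - ((l.map (·.1)).countP (fun k => bMedium.contains k) : Nat)) := by
  induction l generalizing acc with
  | nil => simp
  | cons p t ih =>
    simp only [List.foldl_cons, List.map_cons, List.countP_cons, List.length_cons, ih]
    by_cases h1 : p.1 = "layout" ∨ p.1 = "components" ∨ p.1 = "structure"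
    · have hc : bHigh.contains p.1 = true := by
        rcases h1 with h | h | h <;> rw [h] <;> decide
      have hm : bMedium.contains p.1 = false := by
        rcases h1 with h | h | h <;> rw [h] <;> decide
      simp only [if_pos h1, hc, hm]
      push_cast
      ring
    · have hc : bHigh.contains p.1 = false := by
        rw [Bool.eq_false_iff]
        intro hcon
        apply h1
        have : p.1 ∈ bHigh := by simpa using hcon
        simpa [bHigh] using this
      by_cases h2 : p.1 = "styles" ∨ p.1 = "colors" ∨ p.1 = "fonts"
      · have hm : bMedium.contains p.1 = true := by
          rcases h2 with h | h | h <;> rw [h] <;> decide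
        simp only [if_neg h1, if_pos h2, hc, hm]
        push_cast
        ring
      · have hm : bMedium.contains p.1 = false := by
          rw [Bool.eq_false_iff]
          intro hcon
          apply h2
          have : p.1 ∈ bMedium := by simpa using hcon
          simpa [bMedium] using this
        simp only [if_neg h1, if_neg h2, hc, hm]
        push_cast
        ring

-- ===== VERDICT (by name: the statement is the Claim_ definition above) =====
theorem assess_implementation_complexity_py_spec : Claim_equal_assess_implementation_complexity_py := by
  intro modifications _
  unfold Spec_assess_implementation_complexity_py
  unfold assess_implementation_complexity_py assess_implementation_complexity_py_alt
  simp only [score_eq]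
  ring_nf
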